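-- pv_equiv track=rewrite | github.com/jgmcfilho/uri-codes-python | 1251.py | _map_to_dict
-- ===== SOURCE A (Python) =====
-- def _map_to_dict(string):
--     _dict = {}
--     for char in string:
--         if not str(ord(char)) in _dict:
--             _dict[str(ord(char))] = 1
--             continue
--         _dict[str(ord(char))] += 1
--     # sorting by value
--     return _sort_by_value({k: v for k, v in sorted(_dict.items(), key=lambda item: item[1])})
--
-- def _sort_by_value(_dict):
--     _list = list(_dict.items())
--     n = len(_list)
--     for i in range(n):
--         for j in range(n):
--             if _list[i][1] == _list[j][1] and int(_list[i][0]) > int(_list[j][0]):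
--                 aux = _list[i]
--                 _list[i] = _list[j]
--                 _list[j] = aux
--     return _list
-- ===== SOURCE B (Python) =====
-- def _map_to_dict(string):
--     counts = {}
--     for char in string:
--         key = str(ord(char))
--         counts[key] = counts.get(key, 0) + 1
--     buckets = {}
--     for key, cnt in counts.items():
--         buckets[cnt] = buckets.get(cnt, []) + [key]
--     result = []
--     for cnt in sorted(buckets):
--         for key in sorted(buckets[cnt], key=int, reverse=True):
--             result.append((key, cnt))
--     return result
-- ===== Notes on version B (the rewrite author's own statement) =====
-- stated objective: simpler
-- what changed: A stable-sorts all items by count and then runs an O(m^2) double swap loop (re-parsing keys with int() in every comparison) to fix ties; B instead groups keys into count buckets and emits buckets in ascending count order with keys sorted int-descending inside each bucket, with no global sort and no quadratic swap pass.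
import Mathlib
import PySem

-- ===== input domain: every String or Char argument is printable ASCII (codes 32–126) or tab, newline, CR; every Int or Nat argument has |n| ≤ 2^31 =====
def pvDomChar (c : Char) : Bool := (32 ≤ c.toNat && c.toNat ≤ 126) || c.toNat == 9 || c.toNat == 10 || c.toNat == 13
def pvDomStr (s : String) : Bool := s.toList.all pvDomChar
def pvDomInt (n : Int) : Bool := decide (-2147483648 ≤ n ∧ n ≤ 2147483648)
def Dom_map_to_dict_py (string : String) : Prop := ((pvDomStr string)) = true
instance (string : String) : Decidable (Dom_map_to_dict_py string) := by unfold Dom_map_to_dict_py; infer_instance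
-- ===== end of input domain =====

-- B replaces A's "global stable sort by count + O(m^2) tie-fixing swap loop" by bucketing keys
-- per count and emitting buckets in ascending count order, keys int-descending inside (simpler).


-- int(s); every string it is applied to below is str(ord(char)), on which int() never raises
def pvKeyInt (s : String) : Int := (PySem.Int.ofStr? s).getD 0

-- ===== PORT A =====
-- _sort_by_value: n = len(_list); double loop over range(n) swapping _list[i] and _list[j]
def pvSortByValue (d : PySem.Dict String Int) : List (String × Int) :=
  let l0 := d.items
  let n : Int := PySem.List.len l0
  (PySem.List.pyRange 0 n).foldl (fun lst i =>
    (PySem.List.pyRange 0 n).foldl (fun lst j =>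
      if (PySem.List.pyGetD lst i ("", 0)).2 = (PySem.List.pyGetD lst j ("", 0)).2 ∧
          pvKeyInt (PySem.List.pyGetD lst j ("", 0)).1 < pvKeyInt (PySem.List.pyGetD lst i ("", 0)).1 then
        let aux := PySem.List.pyGetD lst i ("", 0)
        let lst1 := PySem.List.pySetD lst i (PySem.List.pyGetD lst j ("", 0))
        PySem.List.pySetD lst1 j aux
      else lst) lst) l0

def map_to_dict_py (string : String) : List (String × Int) :=
  let dict0 := string.toList.foldl (fun d char =>
    if d.contains (PySem.Int.toStr (char.toNat : Int)) = false then
      d.insert (PySem.Int.toStr (char.toNat : Int)) 1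
    else
      d.insert (PySem.Int.toStr (char.toNat : Int))
        (d.getD (PySem.Int.toStr (char.toNat : Int)) 0 + 1)) PySem.Dict.empty
  let sortedPairs := PySem.List.sorted dict0.items (fun item => item.2) false
  let dict1 := sortedPairs.foldl (fun d p => d.insert p.1 p.2) PySem.Dict.empty
  pvSortByValue dict1

-- ===== PORT B =====
def map_to_dict_py_alt (string : String) : List (String × Int) :=
  let counts := string.toList.foldl (fun d char =>
    d.insert (PySem.Int.toStr (char.toNat : Int))
      (d.getD (PySem.Int.toStr (char.toNat : Int)) 0 + 1)) PySem.Dict.empty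
  let buckets : PySem.Dict Int (List String) := counts.items.foldl (fun b p =>
    b.insert p.2 (b.getD p.2 [] ++ [p.1])) PySem.Dict.empty
  (PySem.List.sorted buckets.keys (fun c => c) false).foldl (fun res cnt =>
    (PySem.List.sorted (buckets.getD cnt []) pvKeyInt true).foldl (fun res key =>
      res ++ [(key, cnt)]) res) []

-- ===== PRECONDITION & SPEC =====
def Spec_map_to_dict_py (string : String) (out : List (String × Int)) : Prop := out = map_to_dict_py_alt string
instance (string : String) (out : List (String × Int)) : Decidable (Spec_map_to_dict_py string out) := by unfold Spec_map_to_dict_py; infer_instance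

-- ===== CLAIM (what is proved, stated in full; the proofs are below) =====
def Claim_equal_map_to_dict_py : Prop := ∀ (string : String), Dom_map_to_dict_py string → Spec_map_to_dict_py string (map_to_dict_py string)

-- ===== LEMMAS AND PROOFS =====

-- the strict order the final list is arranged by: count ascending, then key (as an int) descending
def pvPrec (a b : String × Int) : Prop := a.2 < b.2 ∨ (a.2 = b.2 ∧ pvKeyInt b.1 < pvKeyInt a.1)

-- the swap condition of A's inner loop
def pvG (a b : String × Int) : Prop := a.2 = b.2 ∧ pvKeyInt b.1 < pvKeyInt a.1

def pvD : String × Int := ("", 0)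

-- A's double loop rewritten over Nat indices (bridged to pvSortByValue below)
def pvStep (k : Nat) (m : List (String × Int)) (j : Nat) : List (String × Int) :=
  if (m.getD k pvD).2 = (m.getD j pvD).2 ∧
      pvKeyInt (m.getD j pvD).1 < pvKeyInt (m.getD k pvD).1 then
    (m.set k (m.getD j pvD)).set j (m.getD k pvD)
  else m

def pvInner (k n : Nat) (m : List (String × Int)) : List (String × Int) :=
  (List.range n).foldl (pvStep k) m

def pvLoop (n : Nat) (l : List (String × Int)) : List (String × Int) :=
  (List.range n).foldl (fun m k => pvInner k n m) l

theorem pvSortByValue_eq (d : PySem.Dict String Int) :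
    pvSortByValue d = pvLoop d.items.length d.items := by
  unfold pvSortByValue pvLoop pvInner pvStep pvD
  simp only [PySem.List.len_eq, PySem.List.pyRange_zero_natCast, List.foldl_map,
    PySem.List.pyGetD_natCast, PySem.List.pySetD_natCast]

-- basic helpers -------------------------------------------------------------

theorem pv_single_swap {α : Type} (xs : List α) (j : Nat) (x : α) (dd : α) (h : j < xs.length) :
    (xs.getD j dd :: xs.set j x).Perm (x :: xs) := by
  induction xs generalizing j with
  | nil => simp at h
  | cons y t ih =>
    cases j with
    | zero => simpa using List.Perm.swap x y t
    | succ j =>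
      have hj : j < t.length := by simpa using h
      simp only [List.getD_cons_succ, List.set_cons_succ]
      have h1 : (t.getD j dd :: y :: t.set j x).Perm (y :: t.getD j dd :: t.set j x) :=
        List.Perm.swap y (t.getD j dd) (t.set j x)
      have h2 : (y :: t.getD j dd :: t.set j x).Perm (y :: x :: t) := (ih j hj).cons y
      exact (h1.trans h2).trans (List.Perm.swap x y t)

theorem pv_swap_perm {α : Type} (m : List α) (i j : Nat) (dd : α)
    (hi : i < m.length) (hj : j < m.length) :
    ((m.set i (m.getD j dd)).set j (m.getD i dd)).Perm m := by
  induction m generalizing i j with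
  | nil => simp at hi
  | cons y t ih =>
    match i, j with
    | 0, 0 => simp
    | 0, j + 1 =>
      have hj' : j < t.length := by simpa using hj
      simpa using pv_single_swap t j y dd hj'
    | i + 1, 0 =>
      have hi' : i < t.length := by simpa using hi
      simpa using pv_single_swap t i y dd hi'
    | i + 1, j + 1 =>
      have hi' : i < t.length := by simpa using hi
      have hj' : j < t.length := by simpa using hj
      simpa using (ih i j hi' hj').cons y

theorem pv_getD_set {α : Type} (m : List α) (i p : Nat) (v : α) (dd : α) (hi : i < m.length) :
    (m.set i v).getD p dd = if p = i then v else m.getD p dd := by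
  simp only [List.getD_eq_getElem?_getD, List.getElem?_set]
  split
  · rename_i h
    simp [h.symm]
  · rename_i h
    rw [if_neg (Ne.symm h)]

-- invariants ----------------------------------------------------------------

def pvInv (l m : List (String × Int)) : Prop :=
  m.Perm l ∧ m.map Prod.snd = l.map Prod.snd

-- positions p < q < bound are already in final order
def pvPrefOrd (m : List (String × Int)) (bound : Nat) : Prop :=
  ∀ p q : Nat, p < q → q < bound → pvPrec (m.getD p pvD) (m.getD q pvD)

theorem pv_val_mono {l m : List (String × Int)}
    (hv : l.Pairwise (fun a b => a.2 ≤ b.2)) (hinv : pvInv l m)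
    {p q : Nat} (hpq : p ≤ q) (hq : q < l.length) :
    (m.getD p pvD).2 ≤ (m.getD q pvD).2 := by
  rcases hinv with ⟨hperm, hsnd⟩
  have hlen : m.length = l.length := hperm.length_eq
  have hp' : p < m.length := by omega
  have hq' : q < m.length := by omega
  have e : ∀ r (hr : r < m.length), (m[r]).2 = (l[r]'(by omega)).2 := by
    intro r hr
    have h1 := List.getElem_of_eq hsnd (show r < (m.map Prod.snd).length by simpa using hr)
    simpa [List.getElem_map] using h1
  rw [List.getD_eq_getElem m pvD hp', List.getD_eq_getElem m pvD hq', e p hp', e q hq']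
  rcases Nat.lt_or_ge p q with h | h
  · exact (List.pairwise_iff_getElem.mp hv) p q (by omega) hq h
  · have : p = q := by omega
    subst this; exact le_refl _

theorem pv_key_ne {l m : List (String × Int)}
    (hk : (l.map (fun p => pvKeyInt p.1)).Nodup) (hinv : pvInv l m)
    {p q : Nat} (hpq : p ≠ q) (hp : p < l.length) (hq : q < l.length) :
    pvKeyInt (m.getD p pvD).1 ≠ pvKeyInt (m.getD q pvD).1 := by
  rcases hinv with ⟨hperm, _⟩
  have hlen : m.length = l.length := hperm.length_eq
  have hmp : (m.map (fun p => pvKeyInt p.1)).Perm (l.map (fun p => pvKeyInt p.1)) :=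
    hperm.map _
  have hnd : (m.map (fun p => pvKeyInt p.1)).Nodup := hmp.nodup_iff.mpr hk
  have hp' : p < m.length := by omega
  have hq' : q < m.length := by omega
  intro hcontra
  rw [List.getD_eq_getElem m pvD hp', List.getD_eq_getElem m pvD hq'] at hcontra
  have h2 : (m.map (fun p => pvKeyInt p.1))[p]'(by simpa using hp') =
      (m.map (fun p => pvKeyInt p.1))[q]'(by simpa using hq') := by
    rw [List.getElem_map, List.getElem_map]
    exact hcontra
  exact hpq (hnd.getElem_inj_iff.mp h2)

-- the key step lemma: one inner-loop iteration preserves the invariants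
theorem pvStep_inv {l m : List (String × Int)} {k j : Nat}
    (hv : l.Pairwise (fun a b => a.2 ≤ b.2))
    (hk : (l.map (fun p => pvKeyInt p.1)).Nodup)
    (hkn : k < l.length) (hjn : j < l.length)
    (hinv : pvInv l m) (hpre : pvPrefOrd m k)
    (hproc : ∀ j' < j, ¬ pvG (m.getD k pvD) (m.getD j' pvD)) :
    pvInv l (pvStep k m j) ∧ pvPrefOrd (pvStep k m j) k ∧
      ∀ j' < j + 1, ¬ pvG ((pvStep k m j).getD k pvD) ((pvStep k m j).getD j' pvD) := by
  have hperm := hinv.1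
  have hsnd := hinv.2
  have hm : m.length = l.length := hperm.length_eq
  have hk' : k < m.length := by omega
  have hj' : j < m.length := by omega
  unfold pvStep
  by_cases hcond : (m.getD k pvD).2 = (m.getD j pvD).2 ∧
      pvKeyInt (m.getD j pvD).1 < pvKeyInt (m.getD k pvD).1
  · rw [if_pos hcond]
    set a := m.getD k pvD with ha
    set b := m.getD j pvD with hb
    have hkj : j ≠ k := by
      intro h
      have hba : b = a := by rw [hb, ha, h]
      rw [hba] at hcond
      exact lt_irrefl _ hcond.2
    have hget : ∀ p, ((m.set k b).set j a).getD p pvD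
        = if p = j then a else if p = k then b else m.getD p pvD := by
      intro p
      rw [pv_getD_set (m.set k b) j p a pvD (by simpa using hj'),
        pv_getD_set m k p b pvD hk']
    have hperm' : ((m.set k b).set j a).Perm m := pv_swap_perm m k j pvD hk' hj'
    have hsnd' : ((m.set k b).set j a).map Prod.snd = m.map Prod.snd := by
      rw [List.map_set, List.map_set]
      have h1 : (m.map Prod.snd)[k]'(by simpa using hk') = b.2 := by
        rw [List.getElem_map, ← List.getD_eq_getElem m pvD hk']
        exact hcond.1
      have h2 : (m.map Prod.snd)[j]'(by simpa using hj') = a.2 := by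
        rw [List.getElem_map, ← List.getD_eq_getElem m pvD hj']
        exact hcond.1.symm
      calc ((m.map Prod.snd).set k b.2).set j a.2
          = ((m.map Prod.snd)).set j a.2 := by rw [← h1, List.set_getElem_self]
        _ = m.map Prod.snd := by rw [← h2, List.set_getElem_self]
    refine ⟨⟨hperm'.trans hperm, hsnd'.trans hsnd⟩, ?_, ?_⟩
    · intro p q hpq hqk
      rw [hget p, hget q]
      have hpk : p ≠ k := by omega
      have hqk' : q ≠ k := by omega
      by_cases hjk : j < k
      · by_cases hqj : q = j
        · rw [if_pos hqj, if_neg (show p ≠ j by omega), if_neg hpk]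
          have hmp_le : (m.getD p pvD).2 ≤ a.2 :=
            pv_val_mono hv ⟨hperm, hsnd⟩ (Nat.le_of_lt (by omega)) hkn
          rcases lt_or_eq_of_le hmp_le with hlt | heq
          · exact Or.inl hlt
          · have hne := pv_key_ne hk ⟨hperm, hsnd⟩ (show p ≠ k by omega) (by omega) hkn
            have hproc_p := hproc p (by omega)
            have hnlt : ¬ (pvKeyInt (m.getD p pvD).1 < pvKeyInt a.1) := fun hlt2 =>
              hproc_p ⟨heq.symm, hlt2⟩
            exact Or.inr ⟨heq, lt_of_le_of_ne (not_lt.mp hnlt) (Ne.symm hne)⟩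
        · by_cases hpj : p = j
          · rw [if_pos hpj, if_neg hqj, if_neg hqk']
            have hbq : b.2 ≤ (m.getD q pvD).2 :=
              pv_val_mono hv ⟨hperm, hsnd⟩ (by omega) (by omega)
            have hqa : (m.getD q pvD).2 ≤ a.2 :=
              pv_val_mono hv ⟨hperm, hsnd⟩ (Nat.le_of_lt (by omega)) hkn
            have heq : (m.getD q pvD).2 = a.2 := le_antisymm hqa (hcond.1 ▸ hbq)
            have hjq := hpre j q (by omega) hqk
            rcases hjq with hlt | ⟨_, hkey⟩
            · exfalso
              rw [← hb] at hlt
              omega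
            · exact Or.inr ⟨heq.symm, lt_trans hkey hcond.2⟩
          · rw [if_neg hpj, if_neg hpk, if_neg hqj, if_neg hqk']
            exact hpre p q hpq hqk
      · rw [if_neg (show p ≠ j by omega), if_neg hpk,
          if_neg (show q ≠ j by omega), if_neg hqk']
        exact hpre p q hpq hqk
    · intro j' hj1
      have hgk : ((m.set k b).set j a).getD k pvD = b := by
        rw [hget k, if_neg (Ne.symm hkj), if_pos rfl]
      rw [hgk, hget j']
      by_cases hjj : j' = j
      · rw [if_pos hjj]
        intro hG
        exact absurd hG.2 (not_lt.mpr (le_of_lt hcond.2))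
      · rw [if_neg hjj]
        by_cases hjk2 : j' = k
        · rw [if_pos hjk2]
          intro hG
          exact lt_irrefl _ hG.2
        · rw [if_neg hjk2]
          intro hG
          exact hproc j' (by omega) ⟨hcond.1.trans hG.1, lt_trans hG.2 hcond.2⟩
  · rw [if_neg hcond]
    refine ⟨hinv, hpre, ?_⟩
    intro j' hj1
    by_cases hjj : j' = j
    · rw [hjj]
      exact fun hG => hcond ⟨hG.1, hG.2⟩
    · exact hproc j' (by omega)

theorem pvInner_inv {l m : List (String × Int)} {k : Nat}
    (hv : l.Pairwise (fun a b => a.2 ≤ b.2))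
    (hk : (l.map (fun p => pvKeyInt p.1)).Nodup)
    (hkn : k < l.length)
    (hinv : pvInv l m) (hpre : pvPrefOrd m k) :
    pvInv l (pvInner k l.length m) ∧ pvPrefOrd (pvInner k l.length m) (k + 1) := by
  have haux : ∀ j, j ≤ l.length →
      pvInv l ((List.range j).foldl (pvStep k) m) ∧
      pvPrefOrd ((List.range j).foldl (pvStep k) m) k ∧
      ∀ j' < j, ¬ pvG (((List.range j).foldl (pvStep k) m).getD k pvD)
        (((List.range j).foldl (pvStep k) m).getD j' pvD) := by
    intro j
    induction j with
    | zero =>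
      intro _
      exact ⟨hinv, hpre, fun j' h => absurd h (by omega)⟩
    | succ j ih =>
      intro hje
      obtain ⟨h1, h2, h3⟩ := ih (by omega)
      rw [List.range_succ, List.foldl_append]
      simpa using pvStep_inv hv hk hkn (by omega) h1 h2 h3
  obtain ⟨h1, h2, h3⟩ := haux l.length le_rfl
  refine ⟨h1, ?_⟩
  intro p q hpq hq1
  by_cases hqk : q = k
  · rw [hqk]
    have h3p := h3 p (by omega)
    have hmp_le : ((pvInner k l.length m).getD p pvD).2 ≤
        ((pvInner k l.length m).getD k pvD).2 :=
      pv_val_mono hv h1 (by omega) hkn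
    rcases lt_or_eq_of_le hmp_le with hlt | heq
    · exact Or.inl hlt
    · have hne := pv_key_ne hk h1 (show p ≠ k by omega) (by omega) hkn
      have hnlt : ¬ (pvKeyInt ((pvInner k l.length m).getD p pvD).1 <
          pvKeyInt ((pvInner k l.length m).getD k pvD).1) := fun hlt2 =>
        h3p ⟨heq.symm, hlt2⟩
      exact Or.inr ⟨heq, lt_of_le_of_ne (not_lt.mp hnlt) (Ne.symm hne)⟩
  · exact h2 p q hpq (by omega)

theorem pvLoop_spec (l : List (String × Int))
    (hv : l.Pairwise (fun a b => a.2 ≤ b.2))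
    (hk : (l.map (fun p => pvKeyInt p.1)).Nodup) :
    (pvLoop l.length l).Perm l ∧ (pvLoop l.length l).Pairwise pvPrec := by
  have haux : ∀ k, k ≤ l.length →
      pvInv l ((List.range k).foldl (fun m k => pvInner k l.length m) l) ∧
      pvPrefOrd ((List.range k).foldl (fun m k => pvInner k l.length m) l) k := by
    intro k
    induction k with
    | zero =>
      exact fun _ => ⟨⟨List.Perm.refl l, rfl⟩, fun p q hpq hq => absurd hq (by omega)⟩
    | succ k ih =>
      intro hke
      obtain ⟨h1, h2⟩ := ih (by omega)
      rw [List.range_succ, List.foldl_append]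
      simpa using pvInner_inv hv hk (by omega) h1 h2
  obtain ⟨h1, h2⟩ := haux l.length le_rfl
  have hfin : pvLoop l.length l =
      (List.range l.length).foldl (fun m k => pvInner k l.length m) l := rfl
  rw [← hfin] at h1 h2
  have hlen : (pvLoop l.length l).length = l.length := h1.1.length_eq
  refine ⟨h1.1, ?_⟩
  rw [List.pairwise_iff_getElem]
  intro i j hi hj hij
  have := h2 i j hij (by omega)
  rwa [List.getD_eq_getElem _ pvD (by omega), List.getD_eq_getElem _ pvD (by omega)] at this

-- B-side --------------------------------------------------------------------

theorem pvB_flatMap (string : String) :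
    map_to_dict_py_alt string =
      (let counts := string.toList.foldl (fun d char =>
        d.insert (PySem.Int.toStr (char.toNat : Int))
          (d.getD (PySem.Int.toStr (char.toNat : Int)) 0 + 1)) PySem.Dict.empty
      let buckets : PySem.Dict Int (List String) := counts.items.foldl (fun b p =>
        b.insert p.2 (b.getD p.2 [] ++ [p.1])) PySem.Dict.empty
      (PySem.List.sorted buckets.keys (fun c => c) false).flatMap (fun cnt =>
        (PySem.List.sorted (buckets.getD cnt []) pvKeyInt true).map (fun key => (key, cnt)))) := by
  unfold map_to_dict_py_alt
  simp only [PySem.List.foldl_append_singleton_eq_map, PySem.List.foldl_append_eq_flatMap,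
    List.nil_append]

theorem pv_flatMap_pairwise (cs : List Int) (F : Int → List (String × Int))
    (hcs : cs.Pairwise (· < ·))
    (hblk : ∀ c ∈ cs, (F c).Pairwise pvPrec)
    (hsnd : ∀ c ∈ cs, ∀ x ∈ F c, x.2 = c) :
    (cs.flatMap F).Pairwise pvPrec := by
  induction cs with
  | nil => simp
  | cons c cs ih =>
    rw [List.flatMap_cons]
    apply List.pairwise_append.mpr
    obtain ⟨hlt, htail⟩ := List.pairwise_cons.mp hcs
    refine ⟨hblk c (List.mem_cons_self), ih htail
      (fun c' hc' => hblk c' (List.mem_cons_of_mem c hc'))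
      (fun c' hc' => hsnd c' (List.mem_cons_of_mem c hc')), ?_⟩
    intro x hx y hy
    obtain ⟨c', hc', hyc'⟩ := List.mem_flatMap.mp hy
    have hx2 : x.2 = c := hsnd c (List.mem_cons_self) x hx
    have hy2 : y.2 = c' := hsnd c' (List.mem_cons_of_mem c hc') y hyc'
    exact Or.inl (by rw [hx2, hy2]; exact hlt c' hc')

theorem pvBuckets_perm (ps : List (String × Int)) (d : PySem.Dict Int (List String))
    (hnd : d.keys.Nodup) :
    ((ps.foldl (fun b p => b.insert p.2 (b.getD p.2 [] ++ [p.1])) d).keys.flatMap (fun c =>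
        ((ps.foldl (fun b p => b.insert p.2 (b.getD p.2 [] ++ [p.1])) d).getD c []).map
          (fun k => (k, c)))).Perm
      ((d.keys.flatMap (fun c => (d.getD c []).map (fun k => (k, c)))) ++ ps) := by
  induction ps generalizing d with
  | nil => simp
  | cons p ps ih =>
    simp only [List.foldl_cons]
    have hstep : d.insert p.2 (d.getD p.2 [] ++ [p.1]) = d.modify p.2 [] (· ++ [p.1]) := rfl
    rw [hstep]
    have hnd' : (d.modify p.2 [] (· ++ [p.1])).keys.Nodup := by
      rw [PySem.Dict.keys_modify]
      exact PySem.Dict.nodup_keys_insert d p.2 _ hnd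
    refine (ih (d.modify p.2 [] (· ++ [p.1])) hnd').trans ?_
    have key : ((d.modify p.2 [] (· ++ [p.1])).keys.flatMap (fun c =>
        ((d.modify p.2 [] (· ++ [p.1])).getD c []).map (fun k => (k, c)))).Perm
        ((d.keys.flatMap (fun c => (d.getD c []).map (fun k => (k, c)))) ++ [p]) := by
      by_cases hc : d.contains p.2
      · have hkeys : (d.modify p.2 [] (· ++ [p.1])).keys = d.keys := by
          rw [PySem.Dict.keys_modify]
          exact PySem.Dict.keys_insert_of_contains d _ hc
        have hmem : p.2 ∈ d.keys := (PySem.Dict.contains_iff_mem_keys d p.2).mp hc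
        obtain ⟨as, bs, hsplit⟩ := List.append_of_mem hmem
        have hndsplit := hnd
        rw [hsplit] at hndsplit
        have hnotas : p.2 ∉ as := fun hmema =>
          (List.disjoint_of_nodup_append hndsplit) hmema List.mem_cons_self
        have hnotbs : p.2 ∉ bs := by
          have := (List.nodup_append.mp hndsplit).2.1
          exact (List.nodup_cons.mp this).1
        rw [hkeys, hsplit, List.flatMap_append, List.flatMap_append, List.flatMap_cons,
          List.flatMap_cons]
        have has : as.flatMap (fun c => ((d.modify p.2 [] (· ++ [p.1])).getD c []).map
            (fun k => (k, c))) = as.flatMap (fun c => (d.getD c []).map (fun k => (k, c))) := by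
          apply List.flatMap_congr
          intro c hcm
          rw [PySem.Dict.getD_modify_of_ne d [] _ (fun h => hnotas (by rw [← h]; exact hcm))]
        have hbs : bs.flatMap (fun c => ((d.modify p.2 [] (· ++ [p.1])).getD c []).map
            (fun k => (k, c))) = bs.flatMap (fun c => (d.getD c []).map (fun k => (k, c))) := by
          apply List.flatMap_congr
          intro c hcm
          rw [PySem.Dict.getD_modify_of_ne d [] _ (fun h => hnotbs (by rw [← h]; exact hcm))]
        have hat : (d.modify p.2 [] (· ++ [p.1])).getD p.2 [] = d.getD p.2 [] ++ [p.1] :=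
          PySem.Dict.getD_modify_self d p.2 [] _
        rw [has, hbs, hat, List.map_append]
        have hpair : ([(p.1, p.2)] : List (String × Int)) = [p] := by simp
        simp only [List.map_cons, List.map_nil, hpair]
        -- X ++ ((A ++ [p]) ++ Y) ~ (X ++ (A ++ Y)) ++ [p]
        have hmid : ((d.getD p.2 []).map (fun k => (k, p.2)) ++ [p] ++
            bs.flatMap (fun c => (d.getD c []).map (fun k => (k, c)))).Perm
            (((d.getD p.2 []).map (fun k => (k, p.2)) ++
              bs.flatMap (fun c => (d.getD c []).map (fun k => (k, c)))) ++ [p]) := by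
          rw [List.append_assoc, List.append_assoc]
          exact List.Perm.append_left _ (List.perm_append_comm)
        refine (List.Perm.append_left _ hmid).trans ?_
        rw [← List.append_assoc]
      · have hkeys : (d.modify p.2 [] (· ++ [p.1])).keys = d.keys ++ [p.2] := by
          rw [PySem.Dict.keys_modify]
          exact PySem.Dict.keys_insert_of_not_contains d _ (by simpa using hc)
        have hnotmem : p.2 ∉ d.keys := fun hm =>
          by rw [(PySem.Dict.contains_iff_mem_keys d p.2).mpr hm] at hc; exact hc rfl
        rw [hkeys, List.flatMap_append, List.flatMap_cons, List.flatMap_nil]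
        have hrest : d.keys.flatMap (fun c => ((d.modify p.2 [] (· ++ [p.1])).getD c []).map
            (fun k => (k, c))) = d.keys.flatMap (fun c => (d.getD c []).map (fun k => (k, c))) := by
          apply List.flatMap_congr
          intro c hcm
          rw [PySem.Dict.getD_modify_of_ne d [] _ (fun h => hnotmem (by rw [← h]; exact hcm))]
        have hat : (d.modify p.2 [] (· ++ [p.1])).getD p.2 [] = d.getD p.2 [] ++ [p.1] :=
          PySem.Dict.getD_modify_self d p.2 [] _
        rw [hrest, hat, PySem.Dict.getD_of_not_contains d [] (by simpa using hc)]
        simp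
    refine (key.append_right ps).trans ?_
    rw [List.append_assoc]
    rfl

-- roundtrip on the domain's character codes
theorem pvRT : ∀ n : Fin 127, PySem.Int.ofStr? (PySem.Int.toStr (n : Int)) = some (n : Int) := by decide

-- names for the shared pieces of both programs ------------------------------

def pvKS (string : String) : List String :=
  string.toList.map (fun ch => PySem.Int.toStr ((ch.toNat : Int)))

def pvItems (string : String) : List (String × Int) :=
  (PySem.Dict.counter (pvKS string)).items

def pvS (string : String) : List (String × Int) :=
  PySem.List.sorted (pvItems string) (fun item => item.2) false

def pvBuckets (string : String) : PySem.Dict Int (List String) :=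
  (pvItems string).foldl (fun b p => b.insert p.2 (b.getD p.2 [] ++ [p.1])) PySem.Dict.empty

def pvCs (string : String) : List Int :=
  PySem.List.sorted (pvBuckets string).keys (fun c => c) false

def pvF (string : String) (cnt : Int) : List (String × Int) :=
  (PySem.List.sorted ((pvBuckets string).getD cnt []) pvKeyInt true).map (fun key => (key, cnt))

-- both counting loops build Counter(list of str(ord(char))) ------------------

theorem pvCountA (string : String) :
    string.toList.foldl (fun d char =>
      if d.contains (PySem.Int.toStr (char.toNat : Int)) = false then
        d.insert (PySem.Int.toStr (char.toNat : Int)) 1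
      else
        d.insert (PySem.Int.toStr (char.toNat : Int))
          (d.getD (PySem.Int.toStr (char.toNat : Int)) 0 + 1)) PySem.Dict.empty
      = PySem.Dict.counter (pvKS string) := by
  rw [PySem.Dict.counter_eq_foldl, pvKS, List.foldl_map]
  apply PySem.List.foldl_congr_mem
  intro acc ch _
  by_cases hc : acc.contains (PySem.Int.toStr (ch.toNat : Int)) = false
  · rw [if_pos hc]
    show acc.insert _ (1 : Int) = acc.insert _ (acc.getD _ 0 + 1)
    rw [PySem.Dict.getD_of_not_contains acc 0 hc]
    norm_num
  · rw [if_neg hc]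
    rfl

theorem pvCountB (string : String) :
    string.toList.foldl (fun d char =>
      d.insert (PySem.Int.toStr (char.toNat : Int))
        (d.getD (PySem.Int.toStr (char.toNat : Int)) 0 + 1)) PySem.Dict.empty
      = PySem.Dict.counter (pvKS string) := by
  rw [← PySem.Dict.foldl_insert_getD_add_one_eq_counter, pvKS, List.foldl_map]

-- facts about the shared key list --------------------------------------------

theorem pvMemKS (string : String) (hdom : Dom_map_to_dict_py string) :
    ∀ k ∈ PySem.Set.ofList (pvKS string), ∃ c : Nat, c ≤ 126 ∧ k = PySem.Int.toStr (c : Int) := by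
  intro k hk
  rw [PySem.Set.mem_ofList, pvKS] at hk
  obtain ⟨ch, hch, rfl⟩ := List.mem_map.mp hk
  refine ⟨ch.toNat, ?_, rfl⟩
  unfold Dom_map_to_dict_py pvDomStr at hdom
  have hc := (List.all_eq_true.mp hdom) ch hch
  unfold pvDomChar at hc
  simp only [Bool.or_eq_true, Bool.and_eq_true, decide_eq_true_eq, beq_iff_eq] at hc
  omega

theorem pvRT' : ∀ c : Nat, c ≤ 126 → pvKeyInt (PySem.Int.toStr (c : Int)) = (c : Int) := by
  intro c hc
  have h := pvRT ⟨c, by omega⟩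
  have h2 : PySem.Int.ofStr? (PySem.Int.toStr (c : Int)) = some (c : Int) := by simpa using h
  unfold pvKeyInt
  rw [h2]
  rfl

theorem pvKeyInj (string : String) (hdom : Dom_map_to_dict_py string) :
    ∀ x ∈ PySem.Set.ofList (pvKS string), ∀ y ∈ PySem.Set.ofList (pvKS string),
      pvKeyInt x = pvKeyInt y → x = y := by
  intro x hx y hy hxy
  obtain ⟨a, ha, rfl⟩ := pvMemKS string hdom x hx
  obtain ⟨b, hb, rfl⟩ := pvMemKS string hdom y hy
  rw [pvRT' a ha, pvRT' b hb] at hxy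
  have : a = b := by exact_mod_cast hxy
  rw [this]

theorem pvItemsFst (string : String) :
    (pvItems string).map Prod.fst = PySem.Set.ofList (pvKS string) := by
  rw [pvItems, PySem.Dict.items_counter, List.map_map]
  simp [Function.comp_def]

theorem pvItemsFstNodup (string : String) : ((pvItems string).map Prod.fst).Nodup := by
  rw [pvItemsFst]
  exact PySem.Set.nodup_ofList _

theorem pvItemsKeyNodup (string : String) (hdom : Dom_map_to_dict_py string) :
    ((pvItems string).map (fun p => pvKeyInt p.1)).Nodup := by
  have h : (pvItems string).map (fun p => pvKeyInt p.1) =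
      ((pvItems string).map Prod.fst).map pvKeyInt := by
    rw [List.map_map]
    rfl
  rw [h, pvItemsFst]
  exact List.Nodup.map_on (pvKeyInj string hdom) (PySem.Set.nodup_ofList _)

-- the two sides in normal form ------------------------------------------------

theorem pvA_eq (string : String) : map_to_dict_py string = pvLoop (pvS string).length (pvS string) := by
  unfold map_to_dict_py
  simp only [pvCountA string]
  rw [pvSortByValue_eq]
  have hSnd : ((pvS string).map Prod.fst).Nodup := by
    have hp : ((pvS string).map Prod.fst).Perm ((pvItems string).map Prod.fst) :=
      (PySem.List.sorted_perm _ _ _).map _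
    exact hp.nodup_iff.mpr (pvItemsFstNodup string)
  have hfresh : ((pvS string).foldl (fun d p => d.insert p.1 p.2) PySem.Dict.empty).items
      = pvS string := by
    rw [PySem.Dict.items_foldl_insert_fresh (pvS string) Prod.fst Prod.snd PySem.Dict.empty
      (fun a _ => PySem.Dict.contains_empty a.1) hSnd]
    simp [PySem.Dict.empty]
  rw [show (PySem.List.sorted (PySem.Dict.counter (pvKS string)).items
    (fun item => item.2) false) = pvS string from rfl, hfresh]

theorem pvB_eq (string : String) : map_to_dict_py_alt string = (pvCs string).flatMap (pvF string) := by
  rw [pvB_flatMap]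
  simp only [pvCountB string]
  rfl

-- B's buckets -----------------------------------------------------------------

theorem pvBucketsKeysNodup (string : String) : (pvBuckets string).keys.Nodup := by
  rw [pvBuckets]
  exact PySem.Dict.nodup_keys_foldl_insert_key _ Prod.snd _ _ (by
    rw [PySem.Dict.keys_empty]; exact List.nodup_nil)

theorem pvBucketsGetD (string : String) (c : Int) :
    (pvBuckets string).getD c [] = ((pvItems string).filter (fun p => p.2 == c)).map Prod.fst := by
  rw [pvBuckets]
  have hstep : (fun (b : PySem.Dict Int (List String)) (p : String × Int) =>
      b.insert p.2 (b.getD p.2 [] ++ [p.1])) =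
      (fun b p => b.modify (Prod.swap p).1 [] (· ++ [(Prod.swap p).2])) := rfl
  rw [hstep, show (pvItems string).foldl (fun b p => b.modify (Prod.swap p).1 [] (· ++ [(Prod.swap p).2])) PySem.Dict.empty = ((pvItems string).map Prod.swap).foldl (fun b q => b.modify q.1 [] (· ++ [q.2])) PySem.Dict.empty from (List.foldl_map (f := Prod.swap)
    (g := fun (b : PySem.Dict Int (List String)) (q : Int × String) =>
      b.modify q.1 [] (· ++ [q.2]))).symm]
  rw [PySem.Dict.getD_foldl_modify_append]
  simp [List.filter_map, List.map_map, Function.comp_def]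

theorem pvBucketsPerm (string : String) :
    ((pvBuckets string).keys.flatMap (fun c =>
      ((pvBuckets string).getD c []).map (fun k => (k, c)))).Perm (pvItems string) := by
  have h := pvBuckets_perm (pvItems string) PySem.Dict.empty (by
    rw [PySem.Dict.keys_empty]; exact List.nodup_nil)
  rw [PySem.Dict.keys_empty] at h
  simpa [pvBuckets] using h

-- ===== VERDICT (by name: the statement is the Claim_ definition above) =====
theorem map_to_dict_py_spec : Claim_equal_map_to_dict_py := by
  intro string hdom
  show map_to_dict_py string = map_to_dict_py_alt string
  -- A's normal form and its properties
  have hv : (pvS string).Pairwise (fun a b => a.2 ≤ b.2) :=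
    PySem.List.sorted_pairwise (pvItems string) (fun item => item.2)
  have hkS : ((pvS string).map (fun p => pvKeyInt p.1)).Nodup :=
    (((PySem.List.sorted_perm _ _ _).map _).nodup_iff).mpr (pvItemsKeyNodup string hdom)
  obtain ⟨hApm, hApw⟩ := pvLoop_spec (pvS string) hv hkS
  have hAitems : (pvLoop (pvS string).length (pvS string)).Perm (pvItems string) :=
    hApm.trans (PySem.List.sorted_perm _ _ _)
  -- B's normal form and its properties
  have hBpm : ((pvCs string).flatMap (pvF string)).Perm (pvItems string) := by
    have h1 : ((pvCs string).flatMap (pvF string)).Perm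
        ((pvBuckets string).keys.flatMap (pvF string)) :=
      List.Perm.flatMap_right _ (PySem.List.sorted_perm _ _ _)
    have h2 : ((pvBuckets string).keys.flatMap (pvF string)).Perm
        ((pvBuckets string).keys.flatMap (fun c =>
          ((pvBuckets string).getD c []).map (fun k => (k, c)))) := by
      apply List.Perm.flatMap_left
      intro c _
      rw [pvF]
      exact (PySem.List.sorted_perm _ _ _).map _
    exact (h1.trans h2).trans (pvBucketsPerm string)
  have hBpw : ((pvCs string).flatMap (pvF string)).Pairwise pvPrec := by
    apply pv_flatMap_pairwise
    · -- strictly increasing counts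
      have hle : (pvCs string).Pairwise (fun a b => a ≤ b) :=
        PySem.List.sorted_pairwise _ (fun c => c)
      have hnd : (pvCs string).Nodup :=
        ((PySem.List.sorted_perm _ _ _).nodup_iff).mpr (pvBucketsKeysNodup string)
      exact (hle.and hnd).imp (fun h => lt_of_le_of_ne h.1 h.2)
    · intro c _
      rw [pvF]
      apply List.pairwise_map.mpr
      have hge : (PySem.List.sorted ((pvBuckets string).getD c []) pvKeyInt true).Pairwise
          (fun a b => pvKeyInt b ≤ pvKeyInt a) :=
        PySem.List.sorted_pairwise_rev _ _
      have hndk : ((PySem.List.sorted ((pvBuckets string).getD c []) pvKeyInt true).map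
          pvKeyInt).Nodup := by
        apply (((PySem.List.sorted_perm _ _ _).map pvKeyInt).nodup_iff).mpr
        rw [pvBucketsGetD, List.map_map]
        have hsub : (((pvItems string).filter (fun p => p.2 == c)).map
            (pvKeyInt ∘ Prod.fst)).Sublist ((pvItems string).map (fun p => pvKeyInt p.1)) :=
          List.Sublist.map _ (List.filter_sublist)
        exact (pvItemsKeyNodup string hdom).sublist hsub
      have hne := List.pairwise_map.mp hndk
      exact (hge.and hne).imp (fun h => Or.inr ⟨rfl, lt_of_le_of_ne h.1 (Ne.symm h.2)⟩)
    · intro c _ x hx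
      rw [pvF] at hx
      obtain ⟨k, _, rfl⟩ := List.mem_map.mp hx
      rfl
  -- combine
  rw [pvA_eq, pvB_eq]
  apply List.Perm.eq_of_pairwise (le := pvPrec) ?anti hApw hBpw
    (hAitems.trans hBpm.symm)
  case anti =>
    intro a b _ _ h1 h2
    exfalso
    rcases h1 with h1 | ⟨e1, k1⟩ <;> rcases h2 with h2 | ⟨e2, k2⟩ <;> omega
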